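-- pv_equiv track=rewrite | github.com/bluejoyq/solving | hackerRank/kakao_recommend_1/3.py | solution
-- ===== SOURCE A (Python) =====
-- def solution(arr, x):
--     N = 10**9 + 1
--     x_checker = [0] * x
--     for num in arr:
--         x_checker[num % x] += 1
--     for i in range(N):
--         if x_checker[i % x] == 0:
--             return i
--         x_checker[i % x] -= 1
-- ===== SOURCE B (Python) =====
-- def solution(arr, x):
--     # closed form: the scan stops at min over residues r of r + count[r]*x
--     counts = {}
--     for num in arr:
--         r = num % x
--         counts[r] = counts.get(r, 0) + 1
--     best = None
--     r = 0
--     while r < x and r in counts: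
--         r += 1
--     if r < x:
--         best = r
--     for res, c in counts.items():
--         v = res + c * x
--         if best is None or v < best:
--             best = v
--     return best
-- ===== Notes on version B (the rewrite author's own statement) =====
-- stated objective: alternative
-- what changed: B replaces A's step-by-step scan i=0,1,2,... over a length-x counter array by a closed-form minimum: min over residues r of r + count[r]*x (plus the least residue with zero count), computed from a dict of the residues actually present in arr.
import Mathlib
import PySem

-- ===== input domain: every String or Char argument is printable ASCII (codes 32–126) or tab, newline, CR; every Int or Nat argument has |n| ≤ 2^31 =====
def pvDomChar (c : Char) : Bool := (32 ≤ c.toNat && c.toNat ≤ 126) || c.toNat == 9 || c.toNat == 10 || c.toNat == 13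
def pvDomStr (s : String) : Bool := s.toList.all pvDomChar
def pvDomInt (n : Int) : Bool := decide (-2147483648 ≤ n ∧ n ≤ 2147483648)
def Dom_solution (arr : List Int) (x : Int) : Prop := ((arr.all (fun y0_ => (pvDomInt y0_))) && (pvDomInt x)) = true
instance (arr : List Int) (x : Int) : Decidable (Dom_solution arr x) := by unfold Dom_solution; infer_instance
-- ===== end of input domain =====

-- B replaces A's step-by-step scan i = 0,1,2,… over a length-x counter array by a closed-form
-- minimum: min over residues r of r + count[r]*x (plus the least residue with zero count),
-- computed from a dict of the residues actually present in arr.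

-- ===== PORT A =====
-- x_checker[num % x] += 1, looped over arr
def aInitStep (x : Int) (ch : List Int) (num : Int) : List Int :=
  PySem.List.pySetD ch (PySem.Int.mod num x) (PySem.List.pyGetD ch (PySem.Int.mod num x) 0 + 1)

-- the 'for i in range(N)' loop; fuel = number of remaining iterations (N at the start);
-- fuel 0 ↔ the Python for-loop ends and the function returns None (excluded by Pre_)
def aLoop (x : Int) : Nat → List Int → Int → Int
  | 0, _, _ => 0
  | fuel+1, ch, i =>
    let v := PySem.List.pyGetD ch (PySem.Int.mod i x) 0
    if v = 0 then i
    else aLoop x fuel (PySem.List.pySetD ch (PySem.Int.mod i x) (v - 1)) (i + 1)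

def solution (arr : List Int) (x : Int) : Int :=
  aLoop x (10^9+1) (arr.foldl (aInitStep x) (List.replicate x.toNat 0)) 0

-- ===== PORT B =====
-- counts[r] = counts.get(r, 0) + 1, looped over arr
def bCounts (arr : List Int) (x : Int) : PySem.Dict Int Int :=
  arr.foldl (fun d num => d.insert (PySem.Int.mod num x) (d.getD (PySem.Int.mod num x) 0 + 1))
    PySem.Dict.empty

-- 'while r < x and r in counts: r += 1; best = r if r < x else None'; each pass sees a distinct
-- key of d, so fuel = d.size + 1 suffices (fuel exhaustion is unreachable, proved below)
def bFindFree (d : PySem.Dict Int Int) (x : Int) : Nat → Int → Option Int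
  | 0, _ => none
  | fuel+1, r =>
    if r < x then (if d.contains r then bFindFree d x fuel (r+1) else some r) else none

-- 'v = res + c * x; if best is None or v < best: best = v'
def bMinStep (x : Int) (best : Option Int) (p : Int × Int) : Option Int :=
  match best with
  | none => some (p.1 + p.2 * x)
  | some b => if p.1 + p.2 * x < b then some (p.1 + p.2 * x) else some b

def solution_alt (arr : List Int) (x : Int) : Int :=
  let counts := bCounts arr x
  let best := counts.items.foldl (bMinStep x) (bFindFree counts x (counts.size + 1) 0)
  best.getD 0

-- ===== PRECONDITION & SPEC =====
-- Pre_ excludes x ≤ 0, on which A raises (ZeroDivisionError or IndexError), and inputs with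
-- x + len(arr) > 10^9, on which A's scan bounded to 10^9+1 steps is no longer guaranteed to
-- reach the answer (A can fall off the loop and return None, not an int); any such input also
-- makes A allocate a length-x list of more than 10^9 cells before it could return.
def Pre_solution (arr : List Int) (x : Int) : Prop :=
  1 ≤ x ∧ x + (arr.length : Int) ≤ 10^9
instance (arr : List Int) (x : Int) : Decidable (Pre_solution arr x) := by
  unfold Pre_solution; infer_instance

def pvWitness_solution : List Int × Int := ([5, 3, 3, 8], 3)

def Spec_solution (arr : List Int) (x : Int) (out : Int) : Prop := out = solution_alt arr x
instance (arr : List Int) (x : Int) (out : Int) : Decidable (Spec_solution arr x out) := by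
  unfold Spec_solution; infer_instance

-- ===== CLAIM (what is proved, stated in full; the proofs are below) =====
def Claim_equal_solution : Prop := ∀ (arr : List Int) (x : Int),
  Dom_solution arr x → Pre_solution arr x → Spec_solution arr x (solution arr x)

-- ===== LEMMAS AND PROOFS =====

-- the list of residues of arr mod x, the count of residue r, and the stop value r + count*x
def resL (arr : List Int) (x : Int) : List Int := arr.map (fun a => PySem.Int.mod a x)

def rc (arr : List Int) (x r : Int) : Int := ((resL arr x).count r : Int)

def fv (arr : List Int) (x r : Int) : Int := r + rc arr x r * x

theorem pmod_bounds (a x : Int) (hx : 1 ≤ x) :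
    0 ≤ PySem.Int.mod a x ∧ PySem.Int.mod a x < x := by
  rw [PySem.Int.mod_eq_emod_of_pos (by omega)]
  exact ⟨Int.emod_nonneg a (by omega), Int.emod_lt_of_pos a (by omega)⟩

theorem rc_nonneg (arr : List Int) (x r : Int) : 0 ≤ rc arr x r := by
  unfold rc; positivity

theorem mem_resL_bounds (arr : List Int) (x r : Int) (hx : 1 ≤ x) (h : r ∈ resL arr x) :
    0 ≤ r ∧ r < x := by
  unfold resL at h
  obtain ⟨a, _, rfl⟩ := List.mem_map.1 h
  exact pmod_bounds a x hx

theorem rc_eq_zero_of_not_mem (arr : List Int) (x r : Int) (h : r ∉ resL arr x) :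
    rc arr x r = 0 := by
  unfold rc
  rw [List.count_eq_zero.2 h]
  rfl

theorem fv_emod (arr : List Int) (x r : Int) (hx : 1 ≤ x) (h0 : 0 ≤ r) (h1 : r < x) :
    PySem.Int.mod (fv arr x r) x = r := by
  rw [PySem.Int.mod_eq_emod_of_pos (by omega)]
  unfold fv
  rw [mul_comm, Int.add_mul_emod_self_left]
  exact Int.emod_eq_of_lt h0 h1

-- sum of residue counts over 0..x-1 is the length of the list
theorem sum_count (x : Int) (l : List Int) (hl : ∀ a ∈ l, 0 ≤ a ∧ a < x) :
    (∑ r ∈ Finset.range x.toNat, l.count ((r : Nat) : Int)) = l.length := by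
  induction l with
  | nil => simp
  | cons a t ih =>
    have hat := hl a (by simp)
    have hmem : a.toNat ∈ Finset.range x.toNat := Finset.mem_range.2 (by omega)
    have hsplit : (∑ r ∈ Finset.range x.toNat, (a :: t).count ((r : Nat) : Int))
        = (∑ r ∈ Finset.range x.toNat, t.count ((r : Nat) : Int))
          + (∑ r ∈ Finset.range x.toNat, if r = a.toNat then 1 else 0) := by
      rw [← Finset.sum_add_distrib]
      refine Finset.sum_congr rfl (fun r _ => ?_)
      rw [List.count_cons]
      congr 1
      simp only [beq_iff_eq]
      split_ifs with h1 h2 h2 <;> first | rfl | omega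
    rw [hsplit, ih (fun b hb => hl b (by simp [hb])),
      Finset.sum_ite_eq_of_mem' (Finset.range x.toNat) a.toNat (fun _ => 1) hmem]
    simp

-- pigeonhole: some residue has count * x ≤ len(arr)
theorem exists_small (arr : List Int) (x : Int) (hx : 1 ≤ x) :
    ∃ r, 0 ≤ r ∧ r < x ∧ rc arr x r * x ≤ (arr.length : Int) := by
  by_contra hcon
  push_neg at hcon
  have hl : ∀ a ∈ resL arr x, 0 ≤ a ∧ a < x := fun a ha => mem_resL_bounds arr x a hx ha
  have hsum : (∑ r ∈ Finset.range x.toNat, rc arr x ((r : Nat) : Int))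
      = (arr.length : Int) := by
    unfold rc
    rw [← Nat.cast_sum, sum_count x _ hl]
    simp [resL]
  have hterm : ∀ r ∈ Finset.range x.toNat,
      (arr.length : Int) + 1 ≤ rc arr x ((r : Nat) : Int) * x := by
    intro r hr
    have hrx : ((r : Nat) : Int) < x := by
      have := Finset.mem_range.1 hr; omega
    have := hcon ((r : Nat) : Int) (by positivity) hrx
    omega
  have hge := Finset.card_nsmul_le_sum (Finset.range x.toNat)
    (fun r => rc arr x ((r : Nat) : Int) * x) ((arr.length : Int) + 1) hterm
  rw [← Finset.sum_mul, hsum, Finset.card_range, nsmul_eq_mul] at hge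
  have hxcast : ((x.toNat : Nat) : Int) = x := by omega
  rw [hxcast] at hge
  nlinarith [hx]

-- ============ A side ============

theorem aLoop_spec (arr : List Int) (x : Int) (hx : 1 ≤ x) (m : Nat)
    (hm : fv arr x (PySem.Int.mod (m : Int) x) ≤ (m : Int))
    (hmin : ∀ j : Nat, j < m → ¬ (fv arr x (PySem.Int.mod (j : Int) x) ≤ (j : Int))) :
    ∀ (fuel : Nat) (q s : Int) (ch : List Int), 0 ≤ q → 0 ≤ s → s < x →
      ch.length = x.toNat →
      (∀ r, 0 ≤ r → r < x →
        PySem.List.pyGetD ch r 0 = rc arr x r - q - (if r < s then 1 else 0)) →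
      q * x + s ≤ (m : Int) → (m : Int) < q * x + s + fuel →
      aLoop x fuel ch (q * x + s) = (m : Int) := by
  intro fuel
  induction fuel with
  | zero =>
    intro q s ch hq hs hsx hchlen hinv hle hlt
    norm_num at hlt
    linarith
  | succ f ih =>
    intro q s ch hq hs hsx hchlen hinv hle hlt
    have hmods : PySem.Int.mod (q*x+s) x = s := by
      rw [PySem.Int.mod_eq_emod_of_pos (by omega), show q*x+s = s+x*q by ring,
        Int.add_mul_emod_self_left]
      exact Int.emod_eq_of_lt hs hsx
    have hvs' : PySem.List.pyGetD ch s 0 = rc arr x s - q := by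
      rw [hinv s hs hsx]; simp
    have hqx : 0 ≤ q * x := mul_nonneg hq (by omega)
    -- count of residue s is at least q, else the loop would already have stopped
    have hrcq : q ≤ rc arr x s := by
      by_contra hlt2
      push_neg at hlt2
      have hrc0 := rc_nonneg arr x s
      have hj0 : 0 ≤ fv arr x s := by unfold fv; positivity
      have hjlt : fv arr x s < q*x+s := by
        have h1 : rc arr x s * x ≤ (q-1) * x :=
          mul_le_mul_of_nonneg_right (by omega) (by omega)
        unfold fv; nlinarith
      have hjm : (fv arr x s).toNat < m := by
        have : fv arr x s < (m:Int) := lt_of_lt_of_le hjlt hle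
        omega
      refine hmin (fv arr x s).toNat hjm ?_
      have hcast : (((fv arr x s).toNat : Nat) : Int) = fv arr x s := by omega
      rw [hcast, fv_emod arr x s hx hs hsx]
    simp only [aLoop, hmods, hvs']
    by_cases hv0 : rc arr x s - q = 0
    · rw [if_pos hv0]
      have hstop : fv arr x s = q*x+s := by
        have : rc arr x s = q := by omega
        unfold fv; rw [this]; ring
      rcases eq_or_lt_of_le hle with heq | hlt2
      · exact heq
      · exfalso
        have hi0 : 0 ≤ q*x+s := by positivity
        have hcast : (((q*x+s).toNat : Nat) : Int) = q*x+s := by omega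
        refine hmin (q*x+s).toNat (by omega) ?_
        rw [hcast, hmods, hstop]
    · rw [if_neg hv0]
      have hrc1 : q + 1 ≤ rc arr x s := by omega
      have hfs : q*x+s < fv arr x s := by
        have h1 : (q+1) * x ≤ rc arr x s * x :=
          mul_le_mul_of_nonneg_right hrc1 (by omega)
        unfold fv; nlinarith
      have hneq : q*x+s ≠ (m:Int) := by
        intro he
        rw [← he, hmods] at hm
        omega
      have hlt2 : q*x+s < (m:Int) := lt_of_le_of_ne hle hneq
      have hlen' : (PySem.List.pySetD ch s (rc arr x s - q - 1)).length = x.toNat := by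
        rw [PySem.List.pySetD_of_nonneg _ _ hs]; simp [hchlen]
      have hginv : ∀ r, 0 ≤ r → r < x →
          PySem.List.pyGetD (PySem.List.pySetD ch s (rc arr x s - q - 1)) r 0
            = if r = s then rc arr x s - q - 1 else PySem.List.pyGetD ch r 0 := by
        intro r h0 h1
        rw [PySem.List.pySetD_of_nonneg _ _ hs,
          PySem.List.pyGetD_eq_getElem _ 0 h0 (by rw [List.length_set, hchlen]; omega)]
        by_cases hr : r = s
        · subst hr
          rw [if_pos rfl, List.getElem_set_self (by rw [List.length_set, hchlen]; omega)]
        · rw [if_neg hr, List.getElem_set_ne (by omega) (by rw [List.length_set, hchlen]; omega),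
            ← PySem.List.pyGetD_eq_getElem _ 0 h0 (by rw [hchlen]; omega)]
      have hfcast : (((f+1 : Nat)) : Int) = (f : Int) + 1 := by push_cast; ring
      rcases eq_or_lt_of_le (show s + 1 ≤ x by omega) with hseq | hslt
      · -- s was x-1: wrap to the next block
        rw [show q*x+s+1 = (q+1)*x+0 by linear_combination hseq]
        refine ih (q+1) 0 _ (by omega) le_rfl (by omega) hlen' ?_ ?_ ?_
        · intro r h0 h1
          rw [hginv r h0 h1]
          by_cases hr : r = s
          · subst hr
            rw [if_pos rfl, if_neg (by omega)]
            ring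
          · rw [if_neg hr, hinv r h0 h1, if_pos (by omega), if_neg (by omega)]
            ring
        · linarith
        · rw [hfcast] at hlt; linarith
      · rw [show q*x+s+1 = q*x+(s+1) by ring]
        refine ih q (s+1) _ hq (by omega) hslt hlen' ?_ ?_ ?_
        · intro r h0 h1
          rw [hginv r h0 h1]
          by_cases hr : r = s
          · subst hr
            rw [if_pos rfl, if_pos (by omega)]
          · rw [if_neg hr, hinv r h0 h1]
            by_cases h : r < s
            · rw [if_pos h, if_pos (by omega)]
            · rw [if_neg h, if_neg (by omega)]
        · linarith
        · rw [hfcast] at hlt; linarith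

theorem init_spec (arr : List Int) (x : Int) (hx : 1 ≤ x) :
    ∀ (l : List Int) (ch : List Int), ch.length = x.toNat →
      (l.foldl (aInitStep x) ch).length = x.toNat ∧
      ∀ r, 0 ≤ r → r < x →
        PySem.List.pyGetD (l.foldl (aInitStep x) ch) r 0
          = PySem.List.pyGetD ch r 0 + ((l.map (fun a => PySem.Int.mod a x)).count r : Int) := by
  intro l
  induction l with
  | nil => exact fun ch h => ⟨h, fun r h0 h1 => by simp⟩
  | cons a t ih =>
    intro ch hlen
    have hra := pmod_bounds a x hx
    have hlen' : (aInitStep x ch a).length = x.toNat := by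
      unfold aInitStep
      rw [PySem.List.pySetD_of_nonneg _ _ hra.1]
      simp [hlen]
    obtain ⟨ihl, ihg⟩ := ih (aInitStep x ch a) hlen'
    refine ⟨by simpa using ihl, fun r h0 h1 => ?_⟩
    have hget : PySem.List.pyGetD (aInitStep x ch a) r 0
        = if r = PySem.Int.mod a x then PySem.List.pyGetD ch r 0 + 1
          else PySem.List.pyGetD ch r 0 := by
      unfold aInitStep
      rw [PySem.List.pySetD_of_nonneg _ _ hra.1,
        PySem.List.pyGetD_eq_getElem _ 0 h0 (by rw [List.length_set, hlen]; omega)]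
      by_cases hr : r = PySem.Int.mod a x
      · subst hr
        rw [if_pos rfl, List.getElem_set_self (by rw [List.length_set, hlen]; omega)]
      · rw [if_neg hr, List.getElem_set_ne (by omega) (by rw [List.length_set, hlen]; omega),
          ← PySem.List.pyGetD_eq_getElem _ 0 h0 (by rw [hlen]; omega)]
    have hfold : (a :: t).foldl (aInitStep x) ch = t.foldl (aInitStep x) (aInitStep x ch a) :=
      rfl
    rw [hfold, ihg r h0 h1, hget]
    have hcnt : ((a :: t).map (fun a => PySem.Int.mod a x)).count r
        = (t.map (fun a => PySem.Int.mod a x)).count r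
          + if r = PySem.Int.mod a x then 1 else 0 := by
      simp only [List.map_cons, List.count_cons]
      congr 1
      simp only [beq_iff_eq]
      by_cases h : r = PySem.Int.mod a x
      · simp [h]
      · simp [h]; omega
    rw [hcnt]
    split_ifs with h <;> push_cast <;> ring

-- ============ B side ============

theorem bCounts_eq (arr : List Int) (x : Int) :
    bCounts arr x = PySem.Dict.counter (resL arr x) := by
  unfold bCounts resL
  rw [← PySem.Dict.foldl_insert_getD_add_one_eq_counter]
  exact (List.foldl_map (f := fun a => PySem.Int.mod a x)
    (g := fun (d : PySem.Dict Int Int) r => d.insert r (d.getD r 0 + 1))).symm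

theorem bFindFree_some (d : PySem.Dict Int Int) (x : Int) :
    ∀ (fuel : Nat) (r r0 : Int), bFindFree d x fuel r = some r0 →
      r ≤ r0 ∧ r0 < x ∧ d.contains r0 = false ∧
        (∀ t, r ≤ t → t < r0 → d.contains t = true) := by
  intro fuel
  induction fuel with
  | zero => intro r r0 h; simp [bFindFree] at h
  | succ f ih =>
    intro r r0 h
    unfold bFindFree at h
    split_ifs at h with h1 h2
    · obtain ⟨hle, hlt, hc, hall⟩ := ih (r+1) r0 h
      refine ⟨by omega, hlt, hc, fun t ht1 ht2 => ?_⟩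
      rcases eq_or_lt_of_le ht1 with heq | hlt'
      · rw [← heq]; exact h2
      · exact hall t (by omega) ht2
    · obtain rfl : r = r0 := by simpa using h
      exact ⟨le_refl r, h1, by simpa using h2, fun t ht1 ht2 => by omega⟩

theorem card_prefix (d : PySem.Dict Int Int) (hnd : d.keys.Nodup) (r : Int) (h0 : 0 ≤ r)
    (hall : ∀ t, 0 ≤ t → t < r → d.contains t = true) : r ≤ (d.size : Int) := by
  have hsub : (List.map (fun n : Nat => (n : Int)) (List.range r.toNat)) ⊆ d.keys := by
    intro t ht
    rw [List.mem_map] at ht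
    obtain ⟨n, hn, rfl⟩ := ht
    rw [List.mem_range] at hn
    exact (PySem.Dict.contains_iff_mem_keys d ((n : Nat) : Int)).1
      (hall ((n : Nat) : Int) (by positivity) (by omega))
  have hnd' : (List.map (fun n : Nat => (n : Int)) (List.range r.toNat)).Nodup :=
    List.Nodup.map (fun a b hab => by omega) List.nodup_range
  have hlen := (List.subperm_of_subset hnd' hsub).length_le
  simp only [List.length_map, List.length_range] at hlen
  have hkeys : d.keys.length = d.size := by
    simp [PySem.Dict.keys, PySem.Dict.size]
  omega

theorem bFindFree_none (d : PySem.Dict Int Int) (x : Int) (hnd : d.keys.Nodup) :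
    ∀ (fuel : Nat) (r : Int), 0 ≤ r →
      (∀ t, 0 ≤ t → t < r → d.contains t = true) →
      ((d.size : Int) + 1 ≤ (fuel : Int) + r) →
      bFindFree d x fuel r = none →
      ∀ t, r ≤ t → t < x → d.contains t = true := by
  intro fuel
  induction fuel with
  | zero =>
    intro r h0 hall hfuel _
    have := card_prefix d hnd r h0 hall
    omega
  | succ f ih =>
    intro r h0 hall hfuel h
    unfold bFindFree at h
    split_ifs at h with h1 h2
    · intro t ht1 ht2
      rcases eq_or_lt_of_le ht1 with heq | hlt'
      · rw [← heq]; exact h2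
      · refine ih (r+1) (by omega)
          (fun u hu1 hu2 => ?_) (by push_cast at hfuel ⊢; omega) h t (by omega) ht2
        rcases lt_or_eq_of_le (show u ≤ r by omega) with hu | hu
        · exact hall u hu1 hu
        · rw [hu]; exact h2
    · intro t ht1 ht2; omega

theorem foldl_minStep_some (x : Int) :
    ∀ (l : List (Int × Int)) (b : Int),
      l.foldl (bMinStep x) (some b)
        = some ((l.map (fun p => p.1 + p.2 * x)).foldl min b) := by
  intro l
  induction l with
  | nil => intro b; rfl
  | cons p t ih =>
    intro b
    show List.foldl (bMinStep x) (bMinStep x (some b) p) t = _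
    have : bMinStep x (some b) p = some (min b (p.1 + p.2 * x)) := by
      unfold bMinStep
      dsimp only
      split_ifs with h <;> simp [min_def] <;> omega
    rw [this, ih]
    simp

theorem foldl_min_eq (m : Int) :
    ∀ (l : List Int) (b : Int), m ≤ b → (∀ a ∈ l, m ≤ a) → (m = b ∨ m ∈ l) →
      l.foldl min b = m := by
  intro l
  induction l with
  | nil =>
    intro b h1 _ h3
    simp at h3 ⊢
    omega
  | cons a t ih =>
    intro b h1 h2 h3
    have ha : m ≤ a := h2 a (by simp)
    show t.foldl min (min b a) = m
    refine ih (min b a) (le_min h1 ha) (fun c hc => h2 c (by simp [hc])) ?_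
    rcases h3 with h | h
    · left; omega
    · rcases List.mem_cons.1 h with h | h
      · left; omega
      · right; exact h

-- ============ main ============

theorem main_eq (arr : List Int) (x : Int) (hx : 1 ≤ x)
    (hlen : x + (arr.length : Int) ≤ 10^9) :
    solution arr x = solution_alt arr x := by
  obtain ⟨r0, hr00, hr0x, hr0len⟩ := exists_small arr x hx
  have hfv0 : 0 ≤ fv arr x r0 := by
    have := rc_nonneg arr x r0
    unfold fv; positivity
  have hfvle : fv arr x r0 ≤ x - 1 + (arr.length : Int) := by
    unfold fv; omega
  have hex : ∃ n : Nat, fv arr x (PySem.Int.mod ((n : Nat) : Int) x) ≤ ((n : Nat) : Int) := by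
    refine ⟨(fv arr x r0).toNat, ?_⟩
    have hcast : (((fv arr x r0).toNat : Nat) : Int) = fv arr x r0 := by omega
    rw [hcast, fv_emod arr x r0 hx hr00 hr0x]
  obtain ⟨M, hMspec, hMmin⟩ :
      ∃ M : Nat, fv arr x (PySem.Int.mod ((M : Nat) : Int) x) ≤ ((M : Nat) : Int) ∧
        (∀ j : Nat, j < M →
          ¬ (fv arr x (PySem.Int.mod ((j : Nat) : Int) x) ≤ ((j : Nat) : Int))) :=
    ⟨Nat.find hex, Nat.find_spec hex, fun j hj => Nat.find_min hex hj⟩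
  have hMub : ∀ r, 0 ≤ r → r < x → ((M : Nat) : Int) ≤ fv arr x r := by
    intro r h0 h1
    have hf0 : 0 ≤ fv arr x r := by
      have := rc_nonneg arr x r
      unfold fv; positivity
    by_contra hltc
    push_neg at hltc
    have hjm : (fv arr x r).toNat < M := by omega
    refine hMmin (fv arr x r).toNat hjm ?_
    have hcast : (((fv arr x r).toNat : Nat) : Int) = fv arr x r := by omega
    rw [hcast, fv_emod arr x r hx h0 h1]
  have hMle : ((M : Nat) : Int) ≤ fv arr x r0 := hMub r0 hr00 hr0x
  -- A's loop stops exactly at M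
  have hA : solution arr x = ((M : Nat) : Int) := by
    unfold solution
    obtain ⟨hl1, hl2⟩ := init_spec arr x hx arr (List.replicate x.toNat 0) (by simp)
    have hch : ∀ r, 0 ≤ r → r < x →
        PySem.List.pyGetD (arr.foldl (aInitStep x) (List.replicate x.toNat 0)) r 0
          = rc arr x r - 0 - (if r < 0 then 1 else 0) := by
      intro r h0 h1
      rw [hl2 r h0 h1,
        PySem.List.pyGetD_eq_getElem _ 0 h0 (by simp; omega),
        List.getElem_replicate]
      rw [if_neg (by omega)]
      unfold rc resL
      ring
    have hle0 : (0:Int)*x+0 ≤ ((M : Nat) : Int) := by norm_num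
    have hfuel : ((M : Nat) : Int) < (0:Int)*x+0+((10^9+1 : Nat) : Int) := by
      have hMb : ((M : Nat) : Int) ≤ 10^9 - 1 := by omega
      push_cast
      linarith
    have := aLoop_spec arr x hx (M) hMspec hMmin (10^9+1) 0 0
      (arr.foldl (aInitStep x) (List.replicate x.toNat 0)) le_rfl le_rfl (by omega) hl1 hch
      hle0 hfuel
    simpa using this
  -- B computes the same minimum in closed form
  have hB : solution_alt arr x = ((M : Nat) : Int) := by
    have hs := pmod_bounds ((M : Nat) : Int) x hx
    have hMeq : ((M : Nat) : Int)
        = fv arr x (PySem.Int.mod ((M : Nat) : Int) x) :=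
      le_antisymm (hMub _ hs.1 hs.2) hMspec
    have hmapeq : ((fun p : Int × Int => p.1 + p.2 * x)
          ∘ (fun k => (k, ((resL arr x).count k : Int)))) = fun k => fv arr x k := by
      funext k
      simp [Function.comp, fv, rc]
    have hbound : ∀ a ∈ (PySem.Set.ofList (resL arr x)).map (fun k => fv arr x k),
        ((M : Nat) : Int) ≤ a := by
      intro a ha
      rw [List.mem_map] at ha
      obtain ⟨k, hk, rfl⟩ := ha
      have hkL : k ∈ resL arr x := (PySem.Set.mem_ofList _ _).1 hk
      obtain ⟨hk0, hk1⟩ := mem_resL_bounds arr x k hx hkL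
      exact hMub k hk0 hk1
    unfold solution_alt
    rw [bCounts_eq]
    show (List.foldl (bMinStep x)
        (bFindFree (PySem.Dict.counter (resL arr x)) x
          ((PySem.Dict.counter (resL arr x)).size + 1) 0)
        (PySem.Dict.counter (resL arr x)).items).getD 0 = _
    rcases hfind : bFindFree (PySem.Dict.counter (resL arr x)) x
        ((PySem.Dict.counter (resL arr x)).size + 1) 0 with _ | r0
    · -- no free residue below x: every residue 0..x-1 occurs in arr
      have hall := bFindFree_none (PySem.Dict.counter (resL arr x)) x
        (PySem.Dict.nodup_keys_counter _) ((PySem.Dict.counter (resL arr x)).size + 1) 0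
        le_rfl (fun t h1 h2 => absurd h2 (not_lt.2 h1)) (by push_cast; omega) hfind
      have hsL : PySem.Int.mod ((M : Nat) : Int) x ∈ resL arr x := by
        have := hall _ hs.1 hs.2
        rw [PySem.Dict.contains_counter] at this
        exact List.contains_iff_mem.1 this
      have hsR : PySem.Int.mod ((M : Nat) : Int) x
          ∈ PySem.Set.ofList (resL arr x) := (PySem.Set.mem_ofList _ _).2 hsL
      rcases hR : PySem.Set.ofList (resL arr x) with _ | ⟨k, R'⟩
      · rw [hR] at hsR; simp at hsR
      · rw [PySem.Dict.items_counter, hR, List.map_cons, List.foldl_cons]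
        have h1 : bMinStep x none (k, ((resL arr x).count k : Int))
            = some (fv arr x k) := by
          simp [bMinStep, fv, rc]
        rw [h1, foldl_minStep_some, List.map_map, hmapeq, Option.getD_some]
        have hkR : k ∈ PySem.Set.ofList (resL arr x) := by rw [hR]; simp
        have hkL : k ∈ resL arr x := (PySem.Set.mem_ofList _ _).1 hkR
        obtain ⟨hk0, hk1⟩ := mem_resL_bounds arr x k hx hkL
        refine foldl_min_eq _ _ _ (hMub k hk0 hk1) ?_ ?_
        · intro a ha
          refine hbound a ?_
          rw [hR, List.map_cons]
          exact List.mem_cons_of_mem _ ha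
        · rw [hR] at hsR
          rcases List.mem_cons.1 hsR with hsk | hsR'
          · left; rw [hMeq, hsk]
          · right
            rw [List.mem_map]
            exact ⟨_, hsR', hMeq.symm⟩
    · -- r0 = least residue below x that does not occur in arr
      obtain ⟨hr0le, hr0xb, hr0nc, hr0all⟩ := bFindFree_some _ x _ 0 r0 hfind
      have hr0nm : r0 ∉ resL arr x := by
        intro hmem
        rw [PySem.Dict.contains_counter] at hr0nc
        rw [(List.contains_iff_mem).2 hmem] at hr0nc
        simp at hr0nc
      have hfvr0 : fv arr x r0 = r0 := by
        unfold fv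
        rw [rc_eq_zero_of_not_mem arr x r0 hr0nm]
        ring
      rw [PySem.Dict.items_counter,
        foldl_minStep_some, List.map_map, hmapeq, Option.getD_some]
      refine foldl_min_eq _ _ _ (by rw [← hfvr0]; exact hMub r0 hr0le hr0xb) hbound ?_
      by_cases hsL : PySem.Int.mod ((M : Nat) : Int) x ∈ resL arr x
      · right
        rw [List.mem_map]
        exact ⟨_, (PySem.Set.mem_ofList _ _).2 hsL, hMeq.symm⟩
      · left
        have hfvs : fv arr x (PySem.Int.mod ((M : Nat) : Int) x)
            = PySem.Int.mod ((M : Nat) : Int) x := by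
          unfold fv
          rw [rc_eq_zero_of_not_mem arr x _ hsL]
          ring
        have hMs : ((M : Nat) : Int)
            = PySem.Int.mod ((M : Nat) : Int) x := hMeq.trans hfvs
        have hge : r0 ≤ PySem.Int.mod ((M : Nat) : Int) x := by
          by_contra hltc
          push_neg at hltc
          have := hr0all _ hs.1 hltc
          rw [PySem.Dict.contains_counter] at this
          exact hsL (List.contains_iff_mem.1 this)
        have hle2 : ((M : Nat) : Int) ≤ r0 := by
          rw [← hfvr0]; exact hMub r0 hr0le hr0xb
        omega
  rw [hA, hB]

-- ===== VERDICT (by name: the statement is the Claim_ definition above) =====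
theorem solution_spec : Claim_equal_solution := by
  intro arr x _ hpre
  unfold Spec_solution
  exact main_eq arr x hpre.1 hpre.2
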